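-- pv_equiv track=rewrite | github.com/mithuldas/Do-The-Work | DailyTrackingFile.py | getTaskSetVersionAndName
-- ===== SOURCE A (Python) =====
-- def getTaskSetVersionAndName(headerString):
--     version=""
--     spaceCounter=0
--     for i in headerString:
--         if(i==' '):
--             spaceCounter=spaceCounter+1
--         if spaceCounter==1 and i!=" ":
--             version=version+i
--
--
--     name=""
--     spaceCounter=0
--     for i in headerString:
--         if(i==' '):
--             spaceCounter=spaceCounter+1
--         if spaceCounter>1:
--             name=name+i
--
--     name=name[1:]
--
--     return str(version) + " " + str(name)
-- ===== SOURCE B (Python) =====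
-- def getTaskSetVersionAndName(headerString):
--     parts = headerString.split(' ')
--     version = parts[1] if len(parts) > 1 else ""
--     name = ' '.join(parts[2:])
--     return version + " " + name
-- ===== Notes on version B (the rewrite author's own statement) =====
-- stated objective: simpler
-- what changed: Replaces the two manual space-counting character scans with one tokenization (split on single spaces, which keeps empty tokens) followed by index/slice selection and a join, eliminating the counter state machines.
import Mathlib
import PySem

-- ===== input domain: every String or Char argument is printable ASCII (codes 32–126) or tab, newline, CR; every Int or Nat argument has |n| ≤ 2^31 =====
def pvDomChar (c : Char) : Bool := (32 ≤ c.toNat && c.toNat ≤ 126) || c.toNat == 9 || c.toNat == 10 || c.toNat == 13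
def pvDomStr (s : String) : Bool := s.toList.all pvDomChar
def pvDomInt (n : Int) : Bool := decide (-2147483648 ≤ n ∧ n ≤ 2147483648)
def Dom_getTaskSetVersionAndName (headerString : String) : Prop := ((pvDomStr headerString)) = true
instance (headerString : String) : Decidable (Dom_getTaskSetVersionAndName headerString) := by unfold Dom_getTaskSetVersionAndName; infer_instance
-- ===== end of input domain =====

-- B replaces A's two space-counting scans by one split(' ') tokenization plus index/slice selection (simpler decomposition, same cost).

-- ===== PORT A =====
-- first loop body: version accumulation with space counter
def pvStep1 (st : List Char × Int) (i : Char) : List Char × Int :=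
  let sc := if i = ' ' then st.2 + 1 else st.2
  (if sc = 1 ∧ i ≠ ' ' then st.1 ++ [i] else st.1, sc)

-- second loop body: name accumulation with space counter
def pvStep2 (st : List Char × Int) (i : Char) : List Char × Int :=
  let sc := if i = ' ' then st.2 + 1 else st.2
  (if 1 < sc then st.1 ++ [i] else st.1, sc)

def getTaskSetVersionAndName (headerString : String) : String :=
  let version := (headerString.toList.foldl pvStep1 ([], 0)).1
  let name0 := (headerString.toList.foldl pvStep2 ([], 0)).1
  let name := PySem.List.slice name0 (some 1) none   -- name[1:]
  String.ofList (version ++ [' '] ++ name)           -- version + " " + name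

-- ===== PORT B =====
def getTaskSetVersionAndName_alt (headerString : String) : String :=
  let parts := PySem.Chars.splitOn headerString.toList [' ']   -- headerString.split(' ')
  let version := if 1 < parts.length then parts.getD 1 [] else []   -- parts[1] (in range under the guard) if len(parts) > 1 else ""
  let name := PySem.Chars.join [' '] (parts.drop 2)                 -- ' '.join(parts[2:])
  String.ofList (version ++ [' '] ++ name)

-- ===== PRECONDITION & SPEC =====
def Spec_getTaskSetVersionAndName (headerString : String) (out : String) : Prop := out = getTaskSetVersionAndName_alt headerString
instance (headerString : String) (out : String) : Decidable (Spec_getTaskSetVersionAndName headerString out) := by unfold Spec_getTaskSetVersionAndName; infer_instance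

-- ===== CLAIM (what is proved, stated in full; the proofs are below) =====
def Claim_equal_getTaskSetVersionAndName : Prop := ∀ (headerString : String), Dom_getTaskSetVersionAndName headerString → Spec_getTaskSetVersionAndName headerString (getTaskSetVersionAndName headerString)

-- ===== LEMMAS AND PROOFS =====

-- structural single-space split (proved below to equal PySem.Chars.splitOn · [' '])
def split1 : List Char → List (List Char)
  | [] => [[]]
  | c :: r => if c = ' ' then [] :: split1 r else (c :: (split1 r).headI) :: (split1 r).tail

theorem split1_ne_nil (l : List Char) : split1 l ≠ [] := by
  cases l with
  | nil => simp [split1]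
  | cons c r => simp only [split1]; split <;> simp

theorem cons_headI_tail {α : Type} [Inhabited α] {l : List α} (h : l ≠ []) :
    l.headI :: l.tail = l := by
  cases l with
  | nil => exact absurd rfl h
  | cons a t => rfl

theorem splitOn_go_eq (fuel : Nat) : ∀ (l cur : List Char) (acc : List (List Char)),
    l.length < fuel →
    PySem.Chars.splitOn.go [' '] fuel l cur acc
      = acc.reverse ++ (cur.reverse ++ (split1 l).headI) :: (split1 l).tail := by
  induction fuel with
  | zero => intro l cur acc h; omega
  | succ fuel ih =>
    intro l cur acc h
    cases l with
    | nil => simp [PySem.Chars.splitOn.go, split1]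
    | cons c rest =>
      by_cases hc : c = ' '
      · subst hc
        have hgo : PySem.Chars.splitOn.go [' '] (fuel + 1) (' ' :: rest) cur acc
            = PySem.Chars.splitOn.go [' '] fuel rest [] (cur.reverse :: acc) := by
          simp [PySem.Chars.splitOn.go, List.isPrefixOf]
        rw [hgo, ih rest [] (cur.reverse :: acc) (by simpa using Nat.lt_of_succ_lt_succ h)]
        simp [split1]
        exact cons_headI_tail (split1_ne_nil rest)
      · have hgo : PySem.Chars.splitOn.go [' '] (fuel + 1) (c :: rest) cur acc
            = PySem.Chars.splitOn.go [' '] fuel rest (c :: cur) acc := by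
          simp [PySem.Chars.splitOn.go, List.isPrefixOf]
          intro hcontra; exact absurd hcontra.symm hc
        rw [hgo, ih rest (c :: cur) acc (by simpa using Nat.lt_of_succ_lt_succ h)]
        simp [split1, hc]

theorem splitOn_eq_split1 (l : List Char) : PySem.Chars.splitOn l [' '] = split1 l := by
  unfold PySem.Chars.splitOn
  rw [splitOn_go_eq (l.length + 1) l [] [] (by omega)]
  simpa using cons_headI_tail (split1_ne_nil l)

-- single-step reductions of A's loop bodies
theorem pvStep1_space (v : List Char) (sc : Int) : pvStep1 (v, sc) ' ' = (v, sc + 1) := by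
  simp [pvStep1]

theorem pvStep1_nonspace {c : Char} (hc : c ≠ ' ') (v : List Char) (sc : Int) :
    pvStep1 (v, sc) c = (if sc = 1 then v ++ [c] else v, sc) := by
  simp [pvStep1, hc]

theorem pvStep2_space (n : List Char) (sc : Int) :
    pvStep2 (n, sc) ' ' = (if 1 < sc + 1 then n ++ [' '] else n, sc + 1) := by
  simp [pvStep2]

theorem pvStep2_nonspace {c : Char} (hc : c ≠ ' ') (n : List Char) (sc : Int) :
    pvStep2 (n, sc) c = (if 1 < sc then n ++ [c] else n, sc) := by
  simp [pvStep2, hc]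

-- ===== A's first loop, phase by phase =====
theorem loop1_ge2 : ∀ (cs : List Char) (v : List Char) (sc : Int), 2 ≤ sc →
    (cs.foldl pvStep1 (v, sc)).1 = v
  | [], _, _, _ => rfl
  | c :: r, v, sc, h => by
    by_cases hc : c = ' '
    · subst hc
      rw [List.foldl_cons, pvStep1_space]
      exact loop1_ge2 r v (sc + 1) (by omega)
    · rw [List.foldl_cons, pvStep1_nonspace hc, if_neg (by omega)]
      exact loop1_ge2 r v sc h

theorem loop1_one : ∀ (cs : List Char) (v : List Char),
    (cs.foldl pvStep1 (v, 1)).1 = v ++ (split1 cs).headI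
  | [], v => by simp [split1]
  | c :: r, v => by
    by_cases hc : c = ' '
    · subst hc
      rw [List.foldl_cons, pvStep1_space]
      norm_num
      rw [loop1_ge2 r v 2 (by omega)]
      simp [split1]
    · rw [List.foldl_cons, pvStep1_nonspace hc, if_pos rfl, loop1_one r (v ++ [c])]
      simp [split1, hc]

theorem loop1_zero : ∀ (cs : List Char) (v : List Char),
    (cs.foldl pvStep1 (v, 0)).1 = v ++ (split1 cs).tail.headI
  | [], v => by simp [split1]; rfl
  | c :: r, v => by
    by_cases hc : c = ' '
    · subst hc
      rw [List.foldl_cons, pvStep1_space]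
      norm_num
      rw [loop1_one r v]
      simp [split1]
    · rw [List.foldl_cons, pvStep1_nonspace hc, if_neg (by omega), loop1_zero r v]
      simp [split1, hc]

-- ===== A's second loop, phase by phase =====
theorem loop2_ge2 : ∀ (cs : List Char) (n : List Char) (sc : Int), 2 ≤ sc →
    (cs.foldl pvStep2 (n, sc)).1 = n ++ cs
  | [], n, _, _ => by simp
  | c :: r, n, sc, h => by
    by_cases hc : c = ' '
    · subst hc
      rw [List.foldl_cons, pvStep2_space, if_pos (by omega),
        loop2_ge2 r (n ++ [' ']) (sc + 1) (by omega)]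
      simp
    · rw [List.foldl_cons, pvStep2_nonspace hc, if_pos (by omega), loop2_ge2 r (n ++ [c]) sc h]
      simp

theorem flat_split1 : ∀ (l : List Char),
    ((split1 l).map (fun p => ' ' :: p)).flatten = ' ' :: l
  | [] => by simp [split1]
  | c :: r => by
    by_cases hc : c = ' '
    · subst hc
      simp [split1, flat_split1 r]
    · have IH := flat_split1 r
      rw [← cons_headI_tail (split1_ne_nil r)] at IH
      simp only [List.map_cons, List.flatten_cons, List.cons_append] at IH
      have hr : (split1 r).headI ++ ((split1 r).tail.map (fun p => ' ' :: p)).flatten = r :=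
        List.cons_injective IH
      simp only [split1, if_neg hc, List.map_cons, List.flatten_cons, List.cons_append,
        List.append_assoc]
      simp only [hr]

theorem loop2_one : ∀ (cs : List Char) (n : List Char),
    (cs.foldl pvStep2 (n, 1)).1 = n ++ ((split1 cs).tail.map (fun p => ' ' :: p)).flatten
  | [], n => by simp [split1]
  | c :: r, n => by
    by_cases hc : c = ' '
    · subst hc
      rw [List.foldl_cons, pvStep2_space, if_pos (by omega)]
      norm_num
      rw [loop2_ge2 r (n ++ [' ']) 2 (by omega)]
      simp [split1, flat_split1 r]
    · rw [List.foldl_cons, pvStep2_nonspace hc, if_neg (by omega), loop2_one r n]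
      simp [split1, hc]

theorem loop2_zero : ∀ (cs : List Char) (n : List Char),
    (cs.foldl pvStep2 (n, 0)).1 = n ++ ((split1 cs).tail.tail.map (fun p => ' ' :: p)).flatten
  | [], n => by simp [split1]
  | c :: r, n => by
    by_cases hc : c = ' '
    · subst hc
      rw [List.foldl_cons, pvStep2_space, if_neg (by omega)]
      norm_num
      rw [loop2_one r n]
      simp [split1]
    · rw [List.foldl_cons, pvStep2_nonspace hc, if_neg (by omega), loop2_zero r n]
      simp [split1, hc]

-- ' '.join ps  =  drop 1 of (each part prefixed with a space, concatenated)
theorem intercalate_eq_flat : ∀ (t : List (List Char)) (p : List Char),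
    List.intercalate [' '] (p :: t) = p ++ (t.map (fun q => ' ' :: q)).flatten
  | [], p => by simp [List.intercalate]
  | q :: t', p => by
    have hstep : List.intercalate [' '] (p :: q :: t')
        = p ++ [' '] ++ List.intercalate [' '] (q :: t') := by
      simp [List.intercalate]
    rw [hstep, intercalate_eq_flat t' q]
    simp

theorem drop_one_flat (ps : List (List Char)) :
    ((ps.map (fun p => ' ' :: p)).flatten).drop 1 = List.intercalate [' '] ps := by
  cases ps with
  | nil => simp [List.intercalate]
  | cons p t => rw [intercalate_eq_flat t p]; simp

theorem slice_one (xs : List Char) : PySem.List.slice xs (some 1) none = xs.drop 1 := by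
  cases xs with
  | nil => simp [PySem.List.slice, PySem.List.clampIdx]
  | cons a t =>
    simp [PySem.List.slice, PySem.List.clampIdx]

-- ===== VERDICT (by name: the statement is the Claim_ definition above) =====
theorem getTaskSetVersionAndName_spec : Claim_equal_getTaskSetVersionAndName := by
  intro hs _
  show getTaskSetVersionAndName hs = getTaskSetVersionAndName_alt hs
  simp only [getTaskSetVersionAndName, getTaskSetVersionAndName_alt, splitOn_eq_split1,
    loop1_zero, loop2_zero, slice_one, List.nil_append, PySem.Chars.join]
  have hne := split1_ne_nil hs.toList
  generalize hps : split1 hs.toList = ps at *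
  cases ps with
  | nil => exact absurd rfl hne
  | cons p0 t =>
    cases t with
    | nil =>
      have hd : (default : List Char) = [] := rfl
      simp [List.intercalate, List.headI, hd]
    | cons p1 t' =>
      simp only [List.tail_cons, List.headI_cons, List.length_cons, List.drop_succ_cons,
        List.drop_zero, List.getD_cons_succ, List.getD_cons_zero]
      rw [if_pos (by omega), drop_one_flat]
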